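-- pv_equiv track=rewrite | github.com/rsdarji/sem3-program-debugging | debugging/309/bug2/html_formatter.py | format_with_indentation
-- ===== SOURCE A (Python) =====
-- def is_opening_tag(tag):
--     return tag.startswith('<')
--
-- def is_closing_tag(tag):
--     return tag.startswith('</')
--
-- def format_with_indentation(tokens):
--     indent = 0
--     html_lines = []
--     for token in tokens:
--         if is_closing_tag(token):
--             indent -= 1
--             html_lines.append('  ' * indent + token)
--         elif is_opening_tag(token):
--             html_lines.append('  ' * indent + token)
--             indent += 1
--         else:
--             html_lines.append('  ' * indent + token)
--
--     html = '\n'.join(html_lines)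
--     return html
-- ===== SOURCE B (Python) =====
-- def format_with_indentation(tokens):
--     # two-pass: per-token depth deltas, exclusive prefix sums, then render
--     deltas = [-1 if t.startswith('</') else (1 if t.startswith('<') else 0)
--               for t in tokens]
--     depths = [0]
--     for x in deltas:
--         depths.append(depths[-1] + x)
--     lines = ['  ' * (dep + x if x == -1 else dep) + t
--              for t, x, dep in zip(tokens, deltas, depths)]
--     return '\n'.join(lines)
-- ===== Notes on version B (the rewrite author's own statement) =====
-- stated objective: alternative
-- what changed: Replaces the single mutating-indent loop with a two-pass pipeline: a delta per token, an exclusive prefix-sum of depths, then a stateless render of each token at its precomputed depth.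
import Mathlib
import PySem

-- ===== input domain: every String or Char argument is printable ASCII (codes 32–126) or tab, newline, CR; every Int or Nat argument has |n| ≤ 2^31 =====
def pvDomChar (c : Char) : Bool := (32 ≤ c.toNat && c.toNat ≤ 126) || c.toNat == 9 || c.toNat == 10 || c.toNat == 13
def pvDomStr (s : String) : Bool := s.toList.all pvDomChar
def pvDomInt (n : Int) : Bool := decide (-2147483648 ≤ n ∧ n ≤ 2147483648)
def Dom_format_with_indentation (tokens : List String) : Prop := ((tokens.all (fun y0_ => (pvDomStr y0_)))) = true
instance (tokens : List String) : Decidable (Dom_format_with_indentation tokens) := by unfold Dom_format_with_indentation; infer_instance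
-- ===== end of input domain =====

-- B replaces A's single mutating-indent loop with a two-pass pipeline (per-token deltas,
-- prefix-sum depths, stateless render); alternative decomposition, same cost.


-- '  ' * n for a Python int n (negative gives the empty string)
def pvRep (n : Int) : String := String.mk (List.replicate (2 * n.toNat) ' ')

-- ===== PORT A =====
def format_with_indentation (tokens : List String) : String :=
  let st := tokens.foldl (fun (st : Int × List String) token =>
    if PySem.Str.startswith token "</" then
      (st.1 - 1, st.2 ++ [pvRep (st.1 - 1) ++ token])
    else if PySem.Str.startswith token "<" then
      (st.1 + 1, st.2 ++ [pvRep st.1 ++ token])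
    else
      (st.1, st.2 ++ [pvRep st.1 ++ token])) ((0 : Int), ([] : List String))
  PySem.Str.join "\n" st.2

-- ===== PORT B =====
def pvDelta (t : String) : Int :=
  if PySem.Str.startswith t "</" then -1 else if PySem.Str.startswith t "<" then 1 else 0

def format_with_indentation_alt (tokens : List String) : String :=
  let deltas := tokens.map pvDelta
  let depths := deltas.scanl (· + ·) 0
  let lines := (tokens.zip (deltas.zip depths)).map
    (fun p => pvRep (if p.2.1 = -1 then p.2.2 + p.2.1 else p.2.2) ++ p.1)
  PySem.Str.join "\n" lines

-- ===== PRECONDITION & SPEC =====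
def Spec_format_with_indentation (tokens : List String) (out : String) : Prop := out = format_with_indentation_alt tokens
instance (tokens : List String) (out : String) : Decidable (Spec_format_with_indentation tokens out) := by unfold Spec_format_with_indentation; infer_instance

-- ===== CLAIM (what is proved, stated in full; the proofs are below) =====
def Claim_equal_format_with_indentation : Prop := ∀ (tokens : List String), Dom_format_with_indentation tokens → Spec_format_with_indentation tokens (format_with_indentation tokens)

-- ===== LEMMAS AND PROOFS =====

-- the common line list both programs produce, starting at depth d
def pvRender (tokens : List String) (d : Int) : List String :=
  match tokens with
  | [] => []
  | t :: ts => (pvRep (if pvDelta t = -1 then d - 1 else d) ++ t) :: pvRender ts (d + pvDelta t)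

def pvSum (tokens : List String) (d : Int) : Int :=
  match tokens with
  | [] => d
  | t :: ts => pvSum ts (d + pvDelta t)

theorem pvFoldA (tokens : List String) : ∀ (d : Int) (ls : List String),
    tokens.foldl (fun (st : Int × List String) token =>
      if PySem.Str.startswith token "</" then
        (st.1 - 1, st.2 ++ [pvRep (st.1 - 1) ++ token])
      else if PySem.Str.startswith token "<" then
        (st.1 + 1, st.2 ++ [pvRep st.1 ++ token])
      else
        (st.1, st.2 ++ [pvRep st.1 ++ token])) (d, ls)
      = (pvSum tokens d, ls ++ pvRender tokens d) := by
  induction tokens with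
  | nil => intro d ls; simp [pvSum, pvRender]
  | cons t ts ih =>
    intro d ls
    simp only [List.foldl]
    by_cases h1 : PySem.Str.startswith t "</" = true
    · rw [if_pos h1, ih]
      have hd : pvDelta t = -1 := by unfold pvDelta; rw [if_pos h1]
      simp [pvSum, pvRender, hd, sub_eq_add_neg]
    · by_cases h2 : PySem.Str.startswith t "<" = true
      · rw [if_neg h1, if_pos h2, ih]
        have hd : pvDelta t = 1 := by unfold pvDelta; rw [if_neg h1, if_pos h2]
        simp [pvSum, pvRender, hd]
      · rw [if_neg h1, if_neg h2, ih]
        have hd : pvDelta t = 0 := by unfold pvDelta; rw [if_neg h1, if_neg h2]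
        simp [pvSum, pvRender, hd]

theorem pvZipB (tokens : List String) : ∀ (d : Int),
    (tokens.zip ((tokens.map pvDelta).zip ((tokens.map pvDelta).scanl (· + ·) d))).map
      (fun p => pvRep (if p.2.1 = -1 then p.2.2 + p.2.1 else p.2.2) ++ p.1)
      = pvRender tokens d := by
  induction tokens with
  | nil => intro d; simp [pvRender]
  | cons t ts ih =>
    intro d
    rw [List.map_cons, List.scanl_cons]
    simp only [List.zip_cons_cons, List.map_cons, pvRender, ih]
    congr 1
    by_cases h : pvDelta t = -1
    · simp [h, sub_eq_add_neg]
    · simp [h]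

-- ===== VERDICT (by name: the statement is the Claim_ definition above) =====
theorem format_with_indentation_spec : Claim_equal_format_with_indentation := by
  intro tokens _
  unfold Spec_format_with_indentation format_with_indentation format_with_indentation_alt
  simp only [pvFoldA, pvZipB, List.nil_append]
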